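-- pv_equiv track=rewrite | github.com/DavidAilesChen/FlippedRAG | rag/bert_ranker_utils.py | accumulate_list_by_pid
-- ===== SOURCE A (Python) =====
-- def accumulate_list_by_pid(l, pid_list):
--     """
--     IN:[], []
--     out:{PID: ITEM}
--     """
--     accum_dict = {}
--     for item, pid in zip(l, pid_list):
--         if pid not in accum_dict:
--             accum_dict[pid] = item[1]
--         else:
--             if item[1] != accum_dict[pid]:
--                 raise KeyError("Different")
--     return accum_dict
-- ===== SOURCE B (Python) =====
-- def accumulate_list_by_pid(l, pid_list):
--     # Pass 1: group every item[1] value by pid, in order of first occurrence.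
--     groups = {}
--     for item, pid in zip(l, pid_list):
--         groups[pid] = groups.get(pid, []) + [item[1]]
--     # Pass 2: validate each group against its first value, then map pid -> first value.
--     result = {}
--     for pid, vals in groups.items():
--         first = vals[0]
--         for v in vals:
--             if v != first:
--                 raise KeyError("Different")
--         result[pid] = first
--     return result
-- ===== Notes on version B (the rewrite author's own statement) =====
-- stated objective: alternative
-- what changed: Replaces A's single pass that validates while inserting (first-occurrence insert, equality check on every repeat) by a two-pass decomposition: first group all item[1] values per pid into lists, then validate each group against its first value and map pid to it.
import Mathlib
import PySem

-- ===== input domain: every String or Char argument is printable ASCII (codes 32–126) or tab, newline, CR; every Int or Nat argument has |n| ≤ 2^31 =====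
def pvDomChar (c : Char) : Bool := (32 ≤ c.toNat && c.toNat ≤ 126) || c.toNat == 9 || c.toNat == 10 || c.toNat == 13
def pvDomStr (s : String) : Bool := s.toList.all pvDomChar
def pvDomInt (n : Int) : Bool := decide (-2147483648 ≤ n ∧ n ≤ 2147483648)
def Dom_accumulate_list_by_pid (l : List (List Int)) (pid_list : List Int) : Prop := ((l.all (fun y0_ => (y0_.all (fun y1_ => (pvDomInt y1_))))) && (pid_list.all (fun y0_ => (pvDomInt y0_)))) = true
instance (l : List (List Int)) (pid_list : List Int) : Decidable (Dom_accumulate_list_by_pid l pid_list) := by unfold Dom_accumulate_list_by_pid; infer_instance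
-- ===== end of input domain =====

-- B replaces A's check-while-inserting single pass by a group-then-validate two-pass
-- decomposition (objective: alternative, same cost); return-value equivalence only.

-- ===== PORT A =====
-- A's loop over zip(l, pid_list): insert item[1] on first occurrence of pid, otherwise
-- compare; none = the KeyError("Different") raise, or IndexError from item[1].
def aRun : List (List Int × Int) → PySem.Dict Int Int → Option (PySem.Dict Int Int)
  | [], d => some d
  | (item, pid) :: rest, d =>
    match PySem.List.pyGet? item 1 with
    | none => none                                   -- item[1]: IndexError
    | some v =>
      if !(d.contains pid) then aRun rest (d.insert pid v)
      else if v ≠ d.getD pid 0 then none             -- raise KeyError("Different")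
      else aRun rest d

def accumulate_list_by_pid (l : List (List Int)) (pid_list : List Int) : List (Int × Int) :=
  match aRun (l.zip pid_list) PySem.Dict.empty with
  | none => []                                       -- A raises here; excluded by Pre_
  | some d => d.items

-- ===== PORT B =====
-- Pass 1 of Source B: groups[pid] = groups.get(pid, []) + [item[1]]
def bGroups : List (List Int × Int) → PySem.Dict Int (List Int) → Option (PySem.Dict Int (List Int))
  | [], g => some g
  | (item, pid) :: rest, g =>
    match PySem.List.pyGet? item 1 with
    | none => none                                   -- item[1]: IndexError
    | some v => bGroups rest (g.modify pid [] (· ++ [v]))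

-- Pass 2 of Source B: compare every value of a group to its first; pid -> first value.
def bValidate : List (Int × List Int) → Option (List (Int × Int))
  | [] => some []
  | (pid, vs) :: rest =>
    match PySem.List.pyGet? vs 0 with
    | none => none
    | some first =>
      if vs.any (fun v => v ≠ first) then none       -- raise KeyError("Different")
      else (bValidate rest).map (fun r => (pid, first) :: r)

def accumulate_list_by_pid_alt (l : List (List Int)) (pid_list : List Int) : List (Int × Int) :=
  match bGroups (l.zip pid_list) PySem.Dict.empty with
  | none => []
  | some g => (bValidate g.items).getD []

-- ===== PRECONDITION & SPEC =====
-- Pre_ excludes exactly the inputs on which A raises: a zipped item with fewer than two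
-- elements (IndexError from item[1]) or two zipped pairs with the same pid but different
-- item[1] values (KeyError("Different")).
def Pre_accumulate_list_by_pid (l : List (List Int)) (pid_list : List Int) : Prop :=
  (∀ p ∈ l.zip pid_list, 2 ≤ p.1.length) ∧
  (∀ p ∈ l.zip pid_list, ∀ q ∈ l.zip pid_list, p.2 = q.2 →
    PySem.List.pyGetD p.1 1 0 = PySem.List.pyGetD q.1 1 0)
instance (l : List (List Int)) (pid_list : List Int) : Decidable (Pre_accumulate_list_by_pid l pid_list) := by unfold Pre_accumulate_list_by_pid; infer_instance

def pvWitness_accumulate_list_by_pid : List (List Int) × List Int :=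
  ([[1, 2], [3, 2], [4, 5]], [7, 7, 8])

def Spec_accumulate_list_by_pid (l : List (List Int)) (pid_list : List Int) (out : List (Int × Int)) : Prop := out = accumulate_list_by_pid_alt l pid_list
instance (l : List (List Int)) (pid_list : List Int) (out : List (Int × Int)) : Decidable (Spec_accumulate_list_by_pid l pid_list out) := by unfold Spec_accumulate_list_by_pid; infer_instance

-- ===== CLAIM (what is proved, stated in full; the proofs are below) =====
def Claim_equal_accumulate_list_by_pid : Prop := ∀ (l : List (List Int)) (pid_list : List Int), Dom_accumulate_list_by_pid l pid_list → Pre_accumulate_list_by_pid l pid_list → Spec_accumulate_list_by_pid l pid_list (accumulate_list_by_pid l pid_list)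

-- ===== LEMMAS AND PROOFS =====

-- item[1] succeeds and equals its getD form once the item has at least two elements
theorem pvGet1 (xs : List Int) (h : 2 ≤ xs.length) :
    PySem.List.pyGet? xs 1 = some (PySem.List.pyGetD xs 1 0) := by
  match xs, h with
  | a :: b :: t, _ => simp [PySem.List.pyGet?, PySem.List.pyIdx?, PySem.List.pyGetD]

-- invariant linking A's dict to B's groups dict
def pvRel (d : PySem.Dict Int Int) (g : PySem.Dict Int (List Int)) : Prop :=
  d.keys.Nodup ∧ g.keys = d.keys ∧
  ∀ k ∈ d.keys, ∃ n : Nat, g.getD k [] = List.replicate (n + 1) (d.getD k 0)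

theorem pvMain (zs : List (List Int × Int)) (d : PySem.Dict Int Int)
    (g : PySem.Dict Int (List Int))
    (hlen : ∀ p ∈ zs, 2 ≤ p.1.length)
    (hcons : ∀ p ∈ zs, ∀ q ∈ zs, p.2 = q.2 →
      PySem.List.pyGetD p.1 1 0 = PySem.List.pyGetD q.1 1 0)
    (hC : ∀ p ∈ zs, d.contains p.2 = true → d.getD p.2 0 = PySem.List.pyGetD p.1 1 0)
    (hR : pvRel d g) :
    ∃ d' g', aRun zs d = some d' ∧ bGroups zs g = some g' ∧ pvRel d' g' := by
  induction zs generalizing d g with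
  | nil => exact ⟨d, g, rfl, rfl, hR⟩
  | cons p rest ih =>
    obtain ⟨item, pid⟩ := p
    obtain ⟨hnd, hkeys, hval⟩ := hR
    have hget := pvGet1 item (hlen _ (List.mem_cons_self))
    set v : Int := PySem.List.pyGetD item 1 0 with hv
    have hgm : g.modify pid [] (· ++ [v]) = g.insert pid (g.getD pid [] ++ [v]) := rfl
    by_cases hc : d.contains pid = true
    · -- pid already seen: A checks, B appends v to an all-v group
      have hvd : d.getD pid 0 = v := hC _ List.mem_cons_self hc
      have hgc : g.contains pid = true := by
        rw [PySem.Dict.contains_iff_mem_keys] at hc ⊢; rw [hkeys]; exact hc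
      have hR' : pvRel d (g.modify pid [] (· ++ [v])) := by
        refine ⟨hnd, ?_, ?_⟩
        · rw [hgm, PySem.Dict.keys_insert_of_contains g _ hgc, hkeys]
        · intro k hk
          obtain ⟨n, hn⟩ := hval k hk
          by_cases hkp : k = pid
          · subst hkp
            refine ⟨n + 1, ?_⟩
            rw [hgm, PySem.Dict.getD_insert_self, hn, hvd]
            simp [List.replicate_succ']
          · exact ⟨n, by rw [hgm, PySem.Dict.getD_insert_of_ne g _ _ hkp, hn]⟩
      obtain ⟨d', g', ha, hb, hR''⟩ := ih d (g.modify pid [] (· ++ [v]))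
        (fun q hq => hlen q (List.mem_cons_of_mem _ hq))
        (fun q hq r hr h => hcons q (List.mem_cons_of_mem _ hq) r (List.mem_cons_of_mem _ hr) h)
        (fun q hq hcq => hC q (List.mem_cons_of_mem _ hq) hcq) hR'
      refine ⟨d', g', ?_, ?_, hR''⟩
      · simp [aRun, hget, hc, hvd, ha]
      · simp [bGroups, hget, hb]
    · -- first occurrence of pid: A inserts v, B starts the group [v]
      have hcf : d.contains pid = false := by simpa using hc
      have hgc : g.contains pid = false := by
        rw [Bool.eq_false_iff]
        intro hgt
        rw [PySem.Dict.contains_iff_mem_keys, hkeys,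
          ← PySem.Dict.contains_iff_mem_keys] at hgt
        exact hc hgt
      have hpidnk : pid ∉ d.keys := by
        rw [← PySem.Dict.contains_iff_mem_keys]; exact hc
      have hR' : pvRel (d.insert pid v) (g.modify pid [] (· ++ [v])) := by
        refine ⟨?_, ?_, ?_⟩
        · rw [PySem.Dict.keys_insert_of_not_contains d _ hcf]
          simp only [List.nodup_append, hnd, List.nodup_singleton, true_and]
          intro a ha b hb
          simp only [List.mem_singleton] at hb
          subst hb
          intro hap
          rw [hap] at ha
          exact hpidnk ha
        · rw [hgm, PySem.Dict.keys_insert_of_not_contains g _ hgc,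
            PySem.Dict.keys_insert_of_not_contains d _ hcf, hkeys]
        · intro k hk
          rw [PySem.Dict.keys_insert_of_not_contains d _ hcf] at hk
          rcases List.mem_append.mp hk with hk | hk
          · have hkp : k ≠ pid := fun h => hpidnk (h ▸ hk)
            obtain ⟨n, hn⟩ := hval k hk
            exact ⟨n, by
              rw [hgm, PySem.Dict.getD_insert_of_ne g _ _ hkp, hn,
                PySem.Dict.getD_insert_of_ne d _ _ hkp]⟩
          · have hkp : k = pid := by simpa using hk
            subst hkp
            refine ⟨0, ?_⟩
            rw [hgm, PySem.Dict.getD_insert_self,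
              PySem.Dict.getD_of_not_contains g [] hgc,
              PySem.Dict.getD_insert_self]
            rfl
      have hC' : ∀ q ∈ rest, (d.insert pid v).contains q.2 = true →
          (d.insert pid v).getD q.2 0 = PySem.List.pyGetD q.1 1 0 := by
        intro q hq hcq
        by_cases hqp : q.2 = pid
        · rw [hqp, PySem.Dict.getD_insert_self, hv]
          exact hcons (item, pid) List.mem_cons_self q (List.mem_cons_of_mem _ hq) hqp.symm
        · rw [PySem.Dict.getD_insert_of_ne d _ _ hqp]
          apply hC q (List.mem_cons_of_mem _ hq)
          rw [PySem.Dict.contains_iff_mem_keys] at hcq ⊢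
          rw [PySem.Dict.keys_insert_of_not_contains d _ hcf] at hcq
          rcases List.mem_append.mp hcq with h | h
          · exact h
          · exact absurd (by simpa using h) hqp
      obtain ⟨d', g', ha, hb, hR''⟩ := ih (d.insert pid v) (g.modify pid [] (· ++ [v]))
        (fun q hq => hlen q (List.mem_cons_of_mem _ hq))
        (fun q hq r hr h => hcons q (List.mem_cons_of_mem _ hq) r (List.mem_cons_of_mem _ hr) h)
        hC' hR'
      refine ⟨d', g', ?_, ?_, hR''⟩
      · simp [aRun, hget, hcf, ha]
      · simp [bGroups, hget, hb]

theorem pvValidateAux (d : PySem.Dict Int Int) (g : PySem.Dict Int (List Int))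
    (ks : List Int)
    (h : ∀ k ∈ ks, ∃ n : Nat, g.getD k [] = List.replicate (n + 1) (d.getD k 0)) :
    bValidate (ks.map (fun k => (k, g.getD k []))) =
      some (ks.map (fun k => (k, d.getD k 0))) := by
  induction ks with
  | nil => rfl
  | cons k ks ih =>
    obtain ⟨n, hn⟩ := h k List.mem_cons_self
    have hrest := ih (fun k hk => h k (List.mem_cons_of_mem _ hk))
    simp only [List.map_cons, bValidate, hn]
    have h0 : PySem.List.pyGet? (List.replicate (n + 1) (d.getD k 0)) 0 =
        some (d.getD k 0) := by
      simp [PySem.List.pyGet?, PySem.List.pyIdx?]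
    rw [h0]
    simp [hrest]

theorem pvValidate (d : PySem.Dict Int Int) (g : PySem.Dict Int (List Int))
    (hR : pvRel d g) : bValidate g.items = some d.items := by
  obtain ⟨hnd, hkeys, hval⟩ := hR
  rw [PySem.Dict.items_eq_map_keys g (hkeys ▸ hnd) [],
    PySem.Dict.items_eq_map_keys d hnd 0, hkeys]
  exact pvValidateAux d g d.keys hval

-- ===== VERDICT (by name: the statement is the Claim_ definition above) =====
theorem accumulate_list_by_pid_spec : Claim_equal_accumulate_list_by_pid := by
  intro l pid_list _ hpre
  obtain ⟨hlen, hcons⟩ := hpre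
  obtain ⟨d', g', ha, hb, hR⟩ := pvMain (l.zip pid_list) PySem.Dict.empty PySem.Dict.empty
    hlen hcons
    (fun p _ hc => by simp [PySem.Dict.contains_empty] at hc)
    ⟨by simp [PySem.Dict.keys_empty], by simp [PySem.Dict.keys_empty],
      fun k hk => by simp [PySem.Dict.keys_empty] at hk⟩
  unfold Spec_accumulate_list_by_pid accumulate_list_by_pid accumulate_list_by_pid_alt
  rw [ha, hb]
  simp [pvValidate d' g' hR]
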